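-- pv_equiv track=rewrite | github.com/djmittens/valkyria | bin/run-tests.py | _parse_captured_blocks
-- ===== SOURCE A (Python) =====
-- def _parse_captured_blocks(stdout):
--     """Parse <<<CAPTURED name=X ... >>>CAPTURED blocks from test output."""
--     blocks = {}
--     lines = stdout.splitlines()
--     i = 0
--     while i < len(lines):
--         line = lines[i]
--         if line.startswith("<<<CAPTURED name="):
--             name = line[len("<<<CAPTURED name="):].strip()
--             cap_stdout = []
--             cap_stderr = []
--             target = None
--             i += 1
--             while i < len(lines) and not lines[i].startswith(">>>CAPTURED"):
--                 if lines[i] == "<<<STDOUT":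
--                     target = cap_stdout
--                 elif lines[i] == ">>>STDOUT":
--                     target = None
--                 elif lines[i] == "<<<STDERR":
--                     target = cap_stderr
--                 elif lines[i] == ">>>STDERR":
--                     target = None
--                 elif target is not None:
--                     target.append(lines[i])
--                 i += 1
--             blocks[name] = {
--                 "stdout": "\n".join(cap_stdout),
--                 "stderr": "\n".join(cap_stderr),
--             }
--         i += 1
--     return blocks
-- ===== SOURCE B (Python) =====
-- _MARKERS = ("<<<STDOUT", ">>>STDOUT", "<<<STDERR", ">>>STDERR")
--
--
-- def _channel(content, marker):
--     """Lines of `content` whose most recent preceding marker line is `marker`: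
--     repeatedly jump to the next occurrence of `marker` and slice off the run of
--     lines up to the next marker of any kind."""
--     parts = []
--     rest = content
--     while marker in rest:
--         rest = rest[rest.index(marker) + 1:]
--         stop = next((k for k, l in enumerate(rest) if l in _MARKERS), len(rest))
--         parts.extend(rest[:stop])
--         rest = rest[stop:]
--     return "\n".join(parts)
--
--
-- def _parse_captured_blocks(stdout):
--     """Parse <<<CAPTURED name=X ... >>>CAPTURED blocks from test output."""
--     blocks = {}
--     rest = stdout.splitlines()
--     while True:
--         open_i = next((k for k, l in enumerate(rest)
--                        if l.startswith("<<<CAPTURED name=")), None)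
--         if open_i is None:
--             return blocks
--         name = rest[open_i][len("<<<CAPTURED name="):].strip()
--         rest = rest[open_i + 1:]
--         close_i = next((k for k, l in enumerate(rest)
--                         if l.startswith(">>>CAPTURED")), len(rest))
--         content = rest[:close_i]
--         blocks[name] = {
--             "stdout": _channel(content, "<<<STDOUT"),
--             "stderr": _channel(content, "<<<STDERR"),
--         }
--         rest = rest[close_i + 1:]
-- ===== Notes on version B (the rewrite author's own statement) =====
-- stated objective: alternative
-- what changed: Replaced A's line-by-line nested-while state machine by a search-and-slice parser: the outer loop jumps straight to the next block-opening line and slices out the block content up to the close marker, and each channel is extracted separately by repeatedly jumping to its open marker and slicing off the run of lines up to the next marker of any kind, instead of carrying a live target reference per line.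
import Mathlib
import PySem

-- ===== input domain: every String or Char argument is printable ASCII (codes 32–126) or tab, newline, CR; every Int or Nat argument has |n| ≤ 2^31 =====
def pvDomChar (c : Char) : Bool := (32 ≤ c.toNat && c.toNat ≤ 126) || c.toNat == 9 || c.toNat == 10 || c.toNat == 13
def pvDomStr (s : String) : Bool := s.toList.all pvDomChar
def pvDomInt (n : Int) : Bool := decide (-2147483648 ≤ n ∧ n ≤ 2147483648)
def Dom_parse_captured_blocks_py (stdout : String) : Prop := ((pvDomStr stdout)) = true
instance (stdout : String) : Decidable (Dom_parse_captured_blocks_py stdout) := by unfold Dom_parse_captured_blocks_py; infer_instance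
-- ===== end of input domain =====

-- B replaces A's nested-while state machine by a search-and-slice parser: jump to the next
-- block opener, slice out the block content, and extract each channel by repeated
-- find-marker-then-slice-a-run passes; objective: alternative algorithm, same cost.

-- ===== PORT A =====
-- inner while-loop of A: consumes lines until one starting with ">>>CAPTURED" (which is
-- dropped, mirroring the outer 'i += 1'); target is the list reference, ported as
-- Option Bool (some true = cap_stdout, some false = cap_stderr, none = None).
def pcbInner : List String → List String → List String → Option Bool →
    (List String × List String × List String)
  | [], co, ce, _ => (co, ce, [])
  | l :: rest, co, ce, tgt =>
    if PySem.Str.startswith l ">>>CAPTURED" then (co, ce, rest)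
    else if l = "<<<STDOUT" then pcbInner rest co ce (some true)
    else if l = ">>>STDOUT" then pcbInner rest co ce none
    else if l = "<<<STDERR" then pcbInner rest co ce (some false)
    else if l = ">>>STDERR" then pcbInner rest co ce none
    else match tgt with
      | some true  => pcbInner rest (co ++ [l]) ce tgt
      | some false => pcbInner rest co (ce ++ [l]) tgt
      | none       => pcbInner rest co ce tgt

-- the leftover suffix of the inner loop never grows (for pcbOuter's termination)
theorem pcbInner_len : ∀ (lines co ce : List String) (tgt : Option Bool),
    (pcbInner lines co ce tgt).2.2.length ≤ lines.length := by
  intro lines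
  induction lines with
  | nil => intro co ce tgt; simp [pcbInner]
  | cons l rest ih =>
    intro co ce tgt
    simp only [pcbInner]
    split_ifs <;> try (exact Nat.le_succ_of_le (ih _ _ _))
    · simp
    · match tgt with
      | some true => exact Nat.le_succ_of_le (ih _ _ _)
      | some false => exact Nat.le_succ_of_le (ih _ _ _)
      | none => exact Nat.le_succ_of_le (ih _ _ _)

-- outer while-loop of A over the remaining lines, carrying the blocks dict
def pcbOuter : List String → PySem.Dict String (List (String × String)) →
    PySem.Dict String (List (String × String))
  | [], blocks => blocks
  | l :: rest, blocks =>
    if PySem.Str.startswith l "<<<CAPTURED name=" then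
      let r := pcbInner rest [] [] none
      pcbOuter r.2.2 (blocks.insert (PySem.Str.strip (PySem.Str.slice l (some 17) none))
        [("stdout", PySem.Str.join "\n" r.1), ("stderr", PySem.Str.join "\n" r.2.1)])
    else pcbOuter rest blocks
termination_by lines => lines.length
decreasing_by
  · exact Nat.lt_succ_of_le (pcbInner_len rest [] [] none)
  · simp

def parse_captured_blocks_py (stdout : String) : List (String × List (String × String)) :=
  (pcbOuter (PySem.Str.splitlines stdout) PySem.Dict.empty).items

-- ===== PORT B =====
-- l in _MARKERS
def pcbIsMarker (l : String) : Bool :=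
  l == "<<<STDOUT" || l == ">>>STDOUT" || l == "<<<STDERR" || l == ">>>STDERR"

-- _channel's while loop: 'marker in rest' + 'rest.index(marker)' ported together as index?
-- (some ↔ membership); next(…, len) over enumerate is findIdx (= length when absent).
def chLoop (marker : String) (rest parts : List String) : List String :=
  match h : PySem.List.index? rest marker with
  | none => parts
  | some k =>
    let r1 := PySem.List.slice rest (some ((k + 1 : Nat) : Int)) none   -- rest[rest.index(marker)+1:]
    let stop := r1.findIdx pcbIsMarker
    chLoop marker (PySem.List.slice r1 (some ((stop : Nat) : Int)) none)  -- rest[stop:]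
      (parts ++ PySem.List.slice r1 none (some ((stop : Nat) : Int)))     -- parts.extend(rest[:stop])
termination_by rest.length
decreasing_by
  have hmem : marker ∈ rest := (PySem.List.index?_isSome_iff rest marker).mp (by rw [h]; rfl)
  have hne : rest ≠ [] := by rintro rfl; simp at hmem
  have hpos : 0 < rest.length := List.length_pos_iff.mpr hne
  simp only [PySem.List.slice_from_natCast]
  simp [List.length_drop]
  omega

def pcbChannel (content : List String) (marker : String) : String :=
  PySem.Str.join "\n" (chLoop marker content [])

-- _parse_captured_blocks' while loop over the shrinking suffix 'rest'
def altOuter (lines : List String) (blocks : PySem.Dict String (List (String × String))) :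
    PySem.Dict String (List (String × String)) :=
  match h : lines.findIdx? (fun l => PySem.Str.startswith l "<<<CAPTURED name=") with
  | none => blocks
  | some oi =>
    -- rest[open_i] is in range (findIdx? returned it), ported with getD
    let name := PySem.Str.strip (PySem.Str.slice (lines.getD oi "") (some 17) none)
    let rest := PySem.List.slice lines (some ((oi + 1 : Nat) : Int)) none   -- rest[open_i+1:]
    let ci := rest.findIdx (fun l => PySem.Str.startswith l ">>>CAPTURED")
    let content := PySem.List.slice rest none (some ((ci : Nat) : Int))     -- rest[:close_i]
    altOuter (PySem.List.slice rest (some ((ci + 1 : Nat) : Int)) none)     -- rest[close_i+1:]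
      (blocks.insert name
        [("stdout", pcbChannel content "<<<STDOUT"), ("stderr", pcbChannel content "<<<STDERR")])
termination_by lines.length
decreasing_by
  have hoi : oi < lines.length := by
    have := List.findIdx?_eq_some_iff_findIdx_eq.mp h
    exact this.1
  simp only [PySem.List.slice_from_natCast]
  simp [List.length_drop]
  omega

def parse_captured_blocks_py_alt (stdout : String) : List (String × List (String × String)) :=
  (altOuter (PySem.Str.splitlines stdout) PySem.Dict.empty).items

-- ===== PRECONDITION & SPEC =====
def Spec_parse_captured_blocks_py (stdout : String) (out : List (String × List (String × String))) : Prop := out = parse_captured_blocks_py_alt stdout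
instance (stdout : String) (out : List (String × List (String × String))) : Decidable (Spec_parse_captured_blocks_py stdout out) := by unfold Spec_parse_captured_blocks_py; infer_instance

-- ===== CLAIM (what is proved, stated in full; the proofs are below) =====
def Claim_equal_parse_captured_blocks_py : Prop := ∀ (stdout : String), Dom_parse_captured_blocks_py stdout → Spec_parse_captured_blocks_py stdout (parse_captured_blocks_py stdout)

-- ===== LEMMAS AND PROOFS =====

-- bridge state machine: collects a line iff the most recent marker line equals `marker`
def pcbChan (marker : String) : List String → Option String → List String
  | [], _ => []
  | l :: r, tag =>
    if pcbIsMarker l then pcbChan marker r (some l)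
    else (if tag = some marker then [l] else []) ++ pcbChan marker r tag

-- A's target reference tgt corresponds to tag (the literal last marker seen)
def pcbRel (tgt : Option Bool) (tag : Option String) : Prop :=
  (tgt = some true ↔ tag = some "<<<STDOUT") ∧ (tgt = some false ↔ tag = some "<<<STDERR")

theorem pcbChan_of_not_mem (marker : String) :
    ∀ (l : List String) (tag : Option String), marker ∉ l → tag ≠ some marker →
      pcbChan marker l tag = [] := by
  intro l
  induction l with
  | nil => intro tag _ _; rfl
  | cons x r ih =>
    intro tag hnm htag
    have hxr : marker ∉ r := fun h => hnm (List.mem_cons_of_mem _ h)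
    have hx : x ≠ marker := fun h => hnm (h ▸ List.mem_cons_self)
    simp only [pcbChan]
    by_cases hm : pcbIsMarker x
    · simp only [hm, if_true]
      exact ih (some x) hxr (by simp [hx])
    · simp only [hm, Bool.false_eq_true, if_false, if_neg htag, List.nil_append]
      exact ih tag hxr htag

theorem pcbChan_skip_pre (marker : String) (hm : pcbIsMarker marker = true) :
    ∀ (pre suf : List String) (tag : Option String), marker ∉ pre → tag ≠ some marker →
      pcbChan marker (pre ++ marker :: suf) tag = pcbChan marker suf (some marker) := by
  intro pre
  induction pre with
  | nil =>
    intro suf tag _ _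
    simp [pcbChan, hm]
  | cons x p ih =>
    intro suf tag hnm htag
    have hx : x ≠ marker := fun h => hnm (h ▸ List.mem_cons_self)
    have hp : marker ∉ p := fun h => hnm (List.mem_cons_of_mem _ h)
    simp only [List.cons_append, pcbChan]
    by_cases hxm : pcbIsMarker x
    · simp only [hxm, if_true]
      exact ih suf (some x) hp (by simp [hx])
    · simp only [hxm, Bool.false_eq_true, if_false, if_neg htag, List.nil_append]
      exact ih suf tag hp htag

-- split a some-marker run at the next marker of any kind, resetting the tag to none
theorem pcbChan_run (marker : String) :
    ∀ (suf : List String),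
      pcbChan marker suf (some marker) =
        suf.takeWhile (fun x => !pcbIsMarker x) ++
          pcbChan marker (suf.dropWhile (fun x => !pcbIsMarker x)) none := by
  intro suf
  induction suf with
  | nil => rfl
  | cons x r ih =>
    by_cases hxm : pcbIsMarker x
    · simp [pcbChan, hxm]
    · simp [pcbChan, hxm, ih]

-- take/drop at findIdx is takeWhile/dropWhile of the negation
theorem take_findIdx_eq_takeWhile {α : Type} (p : α → Bool) :
    ∀ (l : List α), l.take (l.findIdx p) = l.takeWhile (fun x => !p x) := by
  intro l
  induction l with
  | nil => rfl
  | cons x r ih =>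
    by_cases hx : p x
    · simp [List.findIdx_cons, hx]
    · simp [List.findIdx_cons, hx, ih]

theorem drop_findIdx_eq_dropWhile {α : Type} (p : α → Bool) :
    ∀ (l : List α), l.drop (l.findIdx p) = l.dropWhile (fun x => !p x) := by
  intro l
  induction l with
  | nil => rfl
  | cons x r ih =>
    by_cases hx : p x
    · simp [List.findIdx_cons, hx]
    · simp [List.findIdx_cons, hx, ih]

-- chLoop computes pcbChan (for any non-collecting starting tag)
theorem chLoop_eq_pcbChan (marker : String) (hm : pcbIsMarker marker = true) :
    ∀ (n : Nat) (l : List String), l.length ≤ n → ∀ (parts : List String) (tag : Option String),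
      tag ≠ some marker → chLoop marker l parts = parts ++ pcbChan marker l tag := by
  intro n
  induction n with
  | zero =>
    intro l hl parts tag htag
    have : l = [] := List.eq_nil_of_length_eq_zero (Nat.le_zero.mp hl)
    subst this
    conv_lhs => rw [chLoop]
    simp [pcbChan]
  | succ n ih =>
    intro l hl parts tag htag
    conv_lhs => rw [chLoop]
    split
    · next heq =>
      have hnm : marker ∉ l := (PySem.List.index?_eq_none_iff l marker).mp heq
      rw [pcbChan_of_not_mem marker l tag hnm htag, List.append_nil]
    · next k heq =>
      obtain ⟨pre, suf, hsplit, hlen, hpre⟩ := (PySem.List.index?_eq_some_iff l marker k).mp heq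
      have hdrop : l.drop (k + 1) = suf := by
        rw [hsplit, ← hlen]
        rw [show pre ++ marker :: suf = (pre ++ [marker]) ++ suf by simp,
            show pre.length + 1 = (pre ++ [marker]).length by simp, List.drop_left]
      have hlL : l.length = pre.length + 1 + suf.length := by rw [hsplit]; simp; omega
      have hsuflen : suf.length ≤ n := by omega
      simp only [PySem.List.slice_from_natCast, PySem.List.slice_to_natCast, hdrop]
      rw [ih (suf.drop (suf.findIdx pcbIsMarker))
          (le_trans (by simpa using Nat.sub_le _ _) hsuflen)
          (parts ++ suf.take (suf.findIdx pcbIsMarker)) none (by simp)]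
      rw [hsplit, pcbChan_skip_pre marker hm pre suf tag hpre htag, pcbChan_run marker suf]
      rw [take_findIdx_eq_takeWhile, drop_findIdx_eq_dropWhile]
      simp

theorem pcbChannel_eq (content : List String) (marker : String)
    (hm : pcbIsMarker marker = true) :
    pcbChannel content marker = PySem.Str.join "\n" (pcbChan marker content none) := by
  unfold pcbChannel
  rw [chLoop_eq_pcbChan marker hm content.length content le_rfl [] none (by simp)]
  simp

-- A's inner loop computes both channels and the leftover suffix
theorem pcbInner_eq_chan :
    ∀ (tail : List String) (co ce : List String) (tgt : Option Bool) (tag : Option String),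
      pcbRel tgt tag →
      pcbInner tail co ce tgt =
        (co ++ pcbChan "<<<STDOUT"
            (tail.take (tail.findIdx (fun l => PySem.Str.startswith l ">>>CAPTURED"))) tag,
         ce ++ pcbChan "<<<STDERR"
            (tail.take (tail.findIdx (fun l => PySem.Str.startswith l ">>>CAPTURED"))) tag,
         tail.drop (tail.findIdx (fun l => PySem.Str.startswith l ">>>CAPTURED") + 1)) := by
  intro tail
  induction tail with
  | nil => intro co ce tgt tag _; simp [pcbInner, pcbChan]
  | cons l rest ih =>
    intro co ce tgt tag hrel
    rw [List.findIdx_cons]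
    by_cases hc : PySem.Str.startswith l ">>>CAPTURED"
    · simp only [pcbInner, hc, if_true, cond_true, List.take_zero]
      simp [pcbChan]
    · have hcb : PySem.Str.startswith l ">>>CAPTURED" = false := Bool.eq_false_iff.mpr hc
      simp only [pcbInner, hcb, Bool.false_eq_true, if_false, cond_false,
        List.take_succ_cons, List.drop_succ_cons]
      by_cases h1 : l = "<<<STDOUT"
      · subst h1
        rw [if_pos rfl]
        rw [ih co ce (some true) (some "<<<STDOUT") (by unfold pcbRel; simp)]
        simp [pcbChan, pcbIsMarker]
      · by_cases h2 : l = ">>>STDOUT"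
        · subst h2
          rw [if_neg (by decide), if_pos rfl]
          rw [ih co ce none (some ">>>STDOUT") (by unfold pcbRel; simp)]
          simp [pcbChan, pcbIsMarker]
        · by_cases h3 : l = "<<<STDERR"
          · subst h3
            rw [if_neg (by decide), if_neg (by decide), if_pos rfl]
            rw [ih co ce (some false) (some "<<<STDERR") (by unfold pcbRel; simp)]
            simp [pcbChan, pcbIsMarker]
          · by_cases h4 : l = ">>>STDERR"
            · subst h4
              rw [if_neg (by decide), if_neg (by decide), if_neg (by decide), if_pos rfl]
              rw [ih co ce none (some ">>>STDERR") (by unfold pcbRel; simp)]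
              simp [pcbChan, pcbIsMarker]
            · have hmark : pcbIsMarker l = false := by
                simp [pcbIsMarker, h1, h2, h3, h4]
              rw [if_neg h1, if_neg h2, if_neg h3, if_neg h4]
              match htgt : tgt with
              | some true =>
                have htag : tag = some "<<<STDOUT" := hrel.1.mp rfl
                subst htag
                rw [ih (co ++ [l]) ce (some true) _ hrel]
                simp [pcbChan, hmark]
              | some false =>
                have htag : tag = some "<<<STDERR" := hrel.2.mp rfl
                subst htag
                rw [ih co (ce ++ [l]) (some false) _ hrel]
                simp [pcbChan, hmark]
              | none =>
                have h5 : ¬ tag = some "<<<STDOUT" := fun hh => by simpa using hrel.1.mpr hh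
                have h6 : ¬ tag = some "<<<STDERR" := fun hh => by simpa using hrel.2.mpr hh
                rw [ih co ce none tag hrel]
                simp [pcbChan, hmark, h5, h6]

-- main: A's outer loop equals B's search-and-slice loop
theorem altOuter_eq_none (lines : List String) (blocks : PySem.Dict String (List (String × String)))
    (h : lines.findIdx? (fun l => PySem.Str.startswith l "<<<CAPTURED name=") = none) :
    altOuter lines blocks = blocks := by
  conv_lhs => rw [altOuter]
  split
  · rfl
  · next oi heq => rw [h] at heq; cases heq

theorem altOuter_eq_some (lines : List String) (blocks : PySem.Dict String (List (String × String)))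
    (oi : Nat)
    (h : lines.findIdx? (fun l => PySem.Str.startswith l "<<<CAPTURED name=") = some oi) :
    altOuter lines blocks =
      altOuter ((lines.drop (oi + 1)).drop
          ((lines.drop (oi + 1)).findIdx (fun l => PySem.Str.startswith l ">>>CAPTURED") + 1))
        (blocks.insert (PySem.Str.strip (PySem.Str.slice (lines.getD oi "") (some 17) none))
          [("stdout", pcbChannel ((lines.drop (oi + 1)).take
              ((lines.drop (oi + 1)).findIdx (fun l => PySem.Str.startswith l ">>>CAPTURED")))
              "<<<STDOUT"),
           ("stderr", pcbChannel ((lines.drop (oi + 1)).take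
              ((lines.drop (oi + 1)).findIdx (fun l => PySem.Str.startswith l ">>>CAPTURED")))
              "<<<STDERR")]) := by
  conv_lhs => rw [altOuter]
  split
  · next heq => rw [h] at heq; cases heq
  · next oi' heq =>
    rw [h] at heq
    cases heq
    simp only [PySem.List.slice_from_natCast, PySem.List.slice_to_natCast]

theorem pcbOuter_eq_altOuter :
    ∀ (n : Nat) (lines : List String), lines.length ≤ n →
      ∀ blocks, pcbOuter lines blocks = altOuter lines blocks := by
  intro n
  induction n with
  | zero =>
    intro lines h blocks
    have : lines = [] := List.eq_nil_of_length_eq_zero (Nat.le_zero.mp h)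
    subst this
    rw [pcbOuter, altOuter_eq_none _ _ (by simp)]
  | succ n ih =>
    intro lines h blocks
    match lines with
    | [] => rw [pcbOuter, altOuter_eq_none _ _ (by simp)]
    | l :: rest =>
      have hr : rest.length ≤ n := by simpa using Nat.succ_le_succ_iff.mp h
      by_cases hl : PySem.Str.startswith l "<<<CAPTURED name=" = true
      · -- open line: both sides form the same block from the same content slice
        have hfi : (l :: rest).findIdx? (fun x => PySem.Str.startswith x "<<<CAPTURED name=")
            = some 0 := by
          rw [List.findIdx?_cons]
          simp only [hl, cond_true]
          simp
        have hinner := pcbInner_eq_chan rest [] [] none none (by unfold pcbRel; simp)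
        rw [altOuter_eq_some _ _ 0 hfi]
        simp only [List.getD_cons_zero, List.drop_succ_cons, List.drop_zero]
        simp only [pcbOuter, hl, eq_self_iff_true, if_true, hinner, List.nil_append]
        rw [pcbChannel_eq _ "<<<STDOUT" (by decide), pcbChannel_eq _ "<<<STDERR" (by decide)]
        exact ih _ (le_trans (by simpa using Nat.sub_le _ _) hr) _
      · -- not an opener: A skips it; B's search skips it too
        have hlb : PySem.Str.startswith l "<<<CAPTURED name=" = false := Bool.eq_false_iff.mpr hl
        simp only [pcbOuter, hlb, Bool.false_eq_true, if_false]
        rcases hfi : rest.findIdx? (fun x => PySem.Str.startswith x "<<<CAPTURED name=") with _ | oi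
        · rw [altOuter_eq_none _ _ (by
              rw [List.findIdx?_cons]; simp only [hlb, hfi]; simp)]
          rw [ih rest hr blocks, altOuter_eq_none _ _ hfi]
        · rw [altOuter_eq_some _ _ (oi + 1) (by
              rw [List.findIdx?_cons]; simp only [hlb, hfi]; simp)]
          simp only [List.getD_cons_succ, List.drop_succ_cons]
          rw [← altOuter_eq_some rest blocks oi hfi]
          exact ih rest hr blocks

-- ===== VERDICT (by name: the statement is the Claim_ definition above) =====
theorem parse_captured_blocks_py_spec : Claim_equal_parse_captured_blocks_py := by
  intro stdout _
  unfold Spec_parse_captured_blocks_py parse_captured_blocks_py parse_captured_blocks_py_alt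
  rw [pcbOuter_eq_altOuter (PySem.Str.splitlines stdout).length _ le_rfl]
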